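-- pv_equiv track=rewrite | github.com/liqunkang/xraylarch | larch/utils/strutils.py | find_delims
-- ===== SOURCE A (Python) =====
-- def find_delims(s, delim='"',match=None):
--     """find matching delimeters (quotes, braces, etc) in a string.
--     returns
--       True, index1, index2 if a match is found
--       False, index1, len(s) if a match is not found
--     the delimiter can be set with the keyword arg delim,
--     and the matching delimiter with keyword arg match.
--
--     if match is None (default), match is set to delim.
--
--     >>> find_delims(mystr, delim=":")
--     >>> find_delims(mystr, delim='<', match='>')
--     """
--     esc, dbesc = "\\", "\\\\"
--     if match is None:
--         match = delim
--     j = s.find(delim)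
--     if j > -1 and s[j:j+len(delim)] == delim:
--         p1, p2, k = None, None, j
--         while k < j+len(s[j+1:]):
--             k = k+1
--             if k > 0: p1 = s[k-1:k]
--             if k > 1: p2 = s[k-2:k]
--             if (s[k:k+len(match)] == match and not (p1 == esc and p2 != dbesc)):
--                 return True, j, k+len(match)-1
--             p1 = s[k:k+1]
--     return False, j, len(s)
-- ===== SOURCE B (Python) =====
-- def find_delims(s, delim='"', match=None):
--     """find matching delimiters (quotes, braces, etc) in a string,
--     honouring backslash escapes; jump between candidate positions
--     with str.find instead of testing every index."""
--     if match is None: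
--         match = delim
--     j = s.find(delim)
--     if j == -1:
--         return False, j, len(s)
--     k = s.find(match, j + 1)
--     while k != -1 and k < len(s):
--         escaped = s[k-1] == '\\' and not (k >= 2 and s[k-2] == '\\')
--         if not escaped:
--             return True, j, k + len(match) - 1
--         k = s.find(match, k + 1)
--     return False, j, len(s)
-- ===== Notes on version B (the rewrite author's own statement) =====
-- stated objective: faster
-- what changed: B replaces A's per-index scan (which builds and compares the slice s[k:k+len(match)] at every single position k, threading p1/p2 lookback state) by jumping directly between occurrences of `match` with str.find(match, k+1) and testing the two-character escape lookback only at actual candidate positions.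
import Mathlib
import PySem

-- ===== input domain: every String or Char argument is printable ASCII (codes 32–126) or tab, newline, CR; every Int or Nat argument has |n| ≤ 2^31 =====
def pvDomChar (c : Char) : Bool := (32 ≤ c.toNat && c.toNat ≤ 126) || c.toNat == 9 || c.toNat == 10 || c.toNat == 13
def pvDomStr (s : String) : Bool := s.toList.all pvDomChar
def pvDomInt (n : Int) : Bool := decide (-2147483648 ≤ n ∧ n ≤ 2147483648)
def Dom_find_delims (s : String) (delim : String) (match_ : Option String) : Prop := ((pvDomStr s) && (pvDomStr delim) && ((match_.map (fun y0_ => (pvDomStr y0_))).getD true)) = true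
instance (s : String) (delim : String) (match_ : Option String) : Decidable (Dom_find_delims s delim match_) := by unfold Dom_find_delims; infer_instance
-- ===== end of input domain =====

-- ===== PORT A =====
-- B jumps between occurrences of `match` with str.find instead of testing every index; equivalence of return values proved below.
-- Literal port of A's while loop: one recursion step per k += 1, fuel = number of iterations of `while k < j+len(s[j+1:])`.
def findDelimsScan (cs sub : List Char) (p1 p2 : Option (List Char)) (k : Int) : Nat → Option Int
  | 0 => none
  | n+1 =>
    let k' := k + 1
    let p1' := if k' > 0 then some (PySem.List.slice cs (some (k' - 1)) (some k')) else p1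
    let p2' := if k' > 1 then some (PySem.List.slice cs (some (k' - 2)) (some k')) else p2
    if PySem.List.slice cs (some k') (some (k' + (sub.length : Int))) = sub ∧
        ¬ (p1' = some ['\\'] ∧ p2' ≠ some ['\\', '\\']) then
      some k'
    else
      findDelimsScan cs sub (some (PySem.List.slice cs (some k') (some (k' + 1)))) p2' k' n

def find_delims (s : String) (delim : String) (match_ : Option String) : Bool × Int × Int :=
  let mt := (match_.getD delim).toList
  let cs := s.toList
  let j := PySem.Chars.find cs delim.toList
  if j > -1 ∧ PySem.List.slice cs (some j) (some (j + (delim.toList.length : Int))) = delim.toList then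
    let bound := j + ((PySem.List.slice cs (some (j + 1)) none).length : Int)
    match findDelimsScan cs mt none none j (bound - j).toNat with
    | some k => (true, j, k + mt.length - 1)
    | none => (false, j, (cs.length : Int))
  else (false, j, (cs.length : Int))

-- ===== PORT B =====
-- Literal port of B's while loop: k jumps via s.find(match, k+1); fuel len(s)+1 bounds the strictly increasing k.
def findDelimsJump (cs sub : List Char) (k : Int) : Nat → Option Int
  | 0 => none
  | n+1 =>
    if k ≠ -1 ∧ k < (cs.length : Int) then
      if ¬ (PySem.List.pyGet? cs (k - 1) = some '\\' ∧
            ¬ (k ≥ 2 ∧ PySem.List.pyGet? cs (k - 2) = some '\\')) then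
        some k
      else
        findDelimsJump cs sub (PySem.Chars.findFrom cs sub (k + 1) none) n
    else none

def find_delims_alt (s : String) (delim : String) (match_ : Option String) : Bool × Int × Int :=
  let mt := (match_.getD delim).toList
  let cs := s.toList
  let j := PySem.Chars.find cs delim.toList
  if j = -1 then (false, j, (cs.length : Int))
  else
    match findDelimsJump cs mt (PySem.Chars.findFrom cs mt (j + 1) none) (cs.length + 1) with
    | some k => (true, j, k + mt.length - 1)
    | none => (false, j, (cs.length : Int))

-- ===== PRECONDITION & SPEC =====
def Spec_find_delims (s : String) (delim : String) (match_ : Option String) (out : Bool × Int × Int) : Prop := out = find_delims_alt s delim match_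
instance (s : String) (delim : String) (match_ : Option String) (out : Bool × Int × Int) : Decidable (Spec_find_delims s delim match_ out) := by unfold Spec_find_delims; infer_instance

-- ===== CLAIM (what is proved, stated in full; the proofs are below) =====
def Claim_equal_find_delims : Prop := ∀ (s : String) (delim : String) (match_ : Option String), Dom_find_delims s delim match_ → Spec_find_delims s delim match_ (find_delims s delim match_)

-- ===== LEMMAS AND PROOFS =====

-- abbreviation used only by the proofs: B's next candidate position after index kN
def findFrom' (cs sub : List Char) (kN : Nat) : Int := PySem.Chars.findFrom cs sub ((kN : Int) + 1) none

-- Python's truncating slice s[t:t+len(sub)] equals sub iff sub occurs (in full) at position t.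
theorem pv_slice_eq_iff (cs sub : List Char) (t : Nat) :
    PySem.List.slice cs (some (t : Int)) (some ((t : Int) + (sub.length : Int))) = sub ↔ sub <+: cs.drop t := by
  rw [PySem.List.slice_natCast_add]
  constructor
  · intro h; rw [← h]; exact List.take_prefix _ _
  · intro h; exact (List.prefix_iff_eq_take.mp h).symm

-- one-char slice s[t:t+1]
theorem pv_slice_one (cs : List Char) (t : Nat) (h : t < cs.length) :
    PySem.List.slice cs (some (t : Int)) (some ((t : Int) + 1)) = [cs[t]] := by
  have e : ((t : Int) + 1) = ((t : Int) + ((1 : Nat) : Int)) := by norm_num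
  rw [e, PySem.List.slice_natCast_add, List.drop_eq_getElem_cons h]
  rfl

-- two-char slice s[t:t+2]
theorem pv_slice_two (cs : List Char) (t : Nat) (h : t + 1 < cs.length) :
    PySem.List.slice cs (some (t : Int)) (some ((t : Int) + 2)) = [cs[t], cs[t+1]] := by
  have e : ((t : Int) + 2) = ((t : Int) + ((2 : Nat) : Int)) := by norm_num
  rw [e, PySem.List.slice_natCast_add, List.drop_eq_getElem_cons (by omega : t < cs.length),
      List.drop_eq_getElem_cons h]
  rfl

-- s.find(sub, a) = a when sub occurs at a
theorem pv_ffHit (cs sub : List Char) (a : Nat) (ha : a ≤ cs.length) (h : sub <+: cs.drop a) :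
    PySem.Chars.findFrom cs sub (a : Int) none = (a : Int) := by
  have hne : PySem.Chars.findFrom cs sub (a : Int) none ≠ -1 := by
    rw [Ne, PySem.Chars.findFrom_natCast_eq_neg_one_iff cs sub a ha]
    exact fun hn => hn h.isInfix
  obtain ⟨h1, h2, h3⟩ := PySem.Chars.findFrom_natCast_spec cs sub a ha hne
  by_contra hc
  exact h3 a le_rfl (by omega) h

-- s.find(sub, a) = s.find(sub, a+1) when sub does not occur at a
theorem pv_ffStep (cs sub : List Char) (a : Nat) (ha : a < cs.length) (h : ¬ sub <+: cs.drop a) :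
    PySem.Chars.findFrom cs sub (a : Int) none = PySem.Chars.findFrom cs sub ((a : Int) + 1) none := by
  have ha1 : a + 1 ≤ cs.length := ha
  have hcast : ((a : Int) + 1) = ((a + 1 : Nat) : Int) := by push_cast; ring
  rw [hcast]
  rcases eq_or_ne (PySem.Chars.findFrom cs sub ((a + 1 : Nat) : Int) none) (-1) with e | e
  · rw [e, PySem.Chars.findFrom_natCast_eq_neg_one_iff cs sub a (le_of_lt ha)]
    intro hinf
    have hninf : ¬ sub <:+: List.drop (a+1) cs :=
      (PySem.Chars.findFrom_natCast_eq_neg_one_iff cs sub (a+1) ha1).mp e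
    obtain ⟨j, hj⟩ := (PySem.Chars.exists_prefix_drop_iff_isIn sub _).mpr
      ((PySem.Chars.isIn_iff_infix sub _).mpr hinf)
    rw [List.drop_drop] at hj
    cases j with
    | zero => exact h (by simpa using hj)
    | succ j' =>
      apply hninf
      have hj2 : sub <+: List.drop j' (List.drop (a+1) cs) := by
        rw [List.drop_drop]
        have : a + 1 + j' = a + (j' + 1) := by omega
        rw [this]; exact hj
      exact hj2.isInfix.trans (List.drop_suffix j' _).isInfix
  · obtain ⟨h1, h2, h3⟩ := PySem.Chars.findFrom_natCast_spec cs sub (a+1) ha1 e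
    have hge : a + 1 ≤ (PySem.Chars.findFrom cs sub ((a + 1 : Nat) : Int) none).toNat := by omega
    have hne : PySem.Chars.findFrom cs sub (a : Int) none ≠ -1 := by
      rw [Ne, PySem.Chars.findFrom_natCast_eq_neg_one_iff cs sub a (le_of_lt ha)]
      intro hn; apply hn
      have hj2 : sub <+: List.drop ((PySem.Chars.findFrom cs sub ((a + 1 : Nat) : Int) none).toNat - a) (List.drop a cs) := by
        rw [List.drop_drop]
        have : a + ((PySem.Chars.findFrom cs sub ((a + 1 : Nat) : Int) none).toNat - a)
            = (PySem.Chars.findFrom cs sub ((a + 1 : Nat) : Int) none).toNat := by omega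
        rw [this]; exact h2
      exact hj2.isInfix.trans (List.drop_suffix _ _).isInfix
    obtain ⟨g1, g2, g3⟩ := PySem.Chars.findFrom_natCast_spec cs sub a (le_of_lt ha) hne
    have hqne : (PySem.Chars.findFrom cs sub (a : Int) none).toNat ≠ a := by
      intro he; exact h (he ▸ g2)
    have h4 : ¬ (PySem.Chars.findFrom cs sub (a : Int) none).toNat
        < (PySem.Chars.findFrom cs sub ((a + 1 : Nat) : Int) none).toNat := by
      intro hlt; exact h3 _ (by omega) hlt g2
    have h5 : ¬ (PySem.Chars.findFrom cs sub ((a + 1 : Nat) : Int) none).toNat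
        < (PySem.Chars.findFrom cs sub (a : Int) none).toNat := by
      intro hlt; exact g3 _ (by omega) hlt h2
    omega

-- find past the end of the empty string is -1
theorem pv_ff_nil (sub : List Char) (st : Int) (h : 0 < st) : PySem.Chars.findFrom [] sub st none = -1 := by
  simp only [PySem.Chars.findFrom, List.length_nil]
  norm_num
  omega

-- the loops agree: A's scan from index kN equals B's find-jump from kN+1
theorem pv_main (cs sub : List Char) : ∀ (d kN : Nat) (p1 p2 : Option (List Char)),
    kN + d + 1 = cs.length → (kN = 0 → p2 = none) →
    ∀ f : Nat, 1 ≤ f →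
    (findFrom' cs sub kN = -1 ∨ (cs.length : Int) ≤ findFrom' cs sub kN ∨
      (cs.length : Int) - findFrom' cs sub kN < (f : Int)) →
    findDelimsScan cs sub p1 p2 (kN : Int) d = findDelimsJump cs sub (findFrom' cs sub kN) f := by
  intro d
  induction d with
  | zero =>
    intro kN p1 p2 hlen hp2 f hf hfuel
    simp only [findFrom'] at hfuel ⊢
    have hcast : ((kN : Int) + 1) = ((kN + 1 : Nat) : Int) := by push_cast; ring
    rw [hcast] at hfuel ⊢
    obtain ⟨f', rfl⟩ : ∃ f', f = f' + 1 := ⟨f - 1, by omega⟩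
    simp only [findDelimsScan, findDelimsJump]
    rcases eq_or_ne (PySem.Chars.findFrom cs sub ((kN + 1 : Nat) : Int) none) (-1) with e | e
    · rw [if_neg]; intro hb; exact hb.1 e
    · have h1 := (PySem.Chars.findFrom_natCast_spec cs sub (kN+1) (by omega) e).1
      rw [if_neg]; intro hb
      have := hb.2
      omega
  | succ d ih =>
    intro kN p1 p2 hlen hp2 f hf hfuel
    have hT : kN + 1 < cs.length := by omega
    have hcast : ((kN : Int) + 1) = ((kN + 1 : Nat) : Int) := by push_cast; ring
    simp only [findFrom'] at hfuel ⊢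
    simp only [findDelimsScan]
    rw [if_pos (show ((kN : Int) + 1) > 0 by omega)]
    have hbound0 : kN < cs.length := by omega
    have hbound1 : kN - 1 < cs.length := by omega
    have e1 : ((kN : Int) + 1 - 1) = ((kN : Nat) : Int) := by omega
    have hp1 : PySem.List.slice cs (some ((kN : Int) + 1 - 1)) (some ((kN : Int) + 1))
        = [cs[kN]'hbound0] := by
      rw [e1]; exact pv_slice_one cs kN hbound0
    have hslice : (PySem.List.slice cs (some ((kN : Int) + 1)) (some ((kN : Int) + 1 + (sub.length : Int))) = sub)
        ↔ sub <+: cs.drop (kN + 1) := by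
      rw [hcast]; exact pv_slice_eq_iff cs sub (kN + 1)
    by_cases hocc : sub <+: cs.drop (kN + 1)
    · -- candidate at kN+1; B's find lands exactly there
      have hff : PySem.Chars.findFrom cs sub ((kN : Int) + 1) none = ((kN + 1 : Nat) : Int) := by
        rw [hcast]; exact pv_ffHit cs sub (kN + 1) (by omega) hocc
      rw [hff] at hfuel ⊢
      obtain ⟨f', rfl⟩ : ∃ f', f = f' + 1 := ⟨f - 1, by omega⟩
      simp only [findDelimsJump]
      rw [if_pos (show ((kN + 1 : Nat) : Int) ≠ -1 ∧ ((kN + 1 : Nat) : Int) < (cs.length : Int) by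
        constructor <;> omega)]
      have eB1 : PySem.List.pyGet? cs (((kN + 1 : Nat) : Int) - 1) = some (cs[kN]'hbound0) := by
        have e : (((kN + 1 : Nat) : Int) - 1) = ((kN : Nat) : Int) := by push_cast; ring
        rw [e, PySem.List.pyGet?_natCast, List.getElem?_eq_getElem hbound0]
      -- both escape tests are the same condition on the chars before the candidate
      have EB_iff : (PySem.List.pyGet? cs (((kN + 1 : Nat) : Int) - 1) = some '\\' ∧
            ¬(((kN + 1 : Nat) : Int) ≥ 2 ∧ PySem.List.pyGet? cs (((kN + 1 : Nat) : Int) - 2) = some '\\'))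
          ↔ (cs[kN]'hbound0 = '\\' ∧ ¬(1 ≤ kN ∧ cs[kN - 1]'hbound1 = '\\')) := by
        rw [eB1]
        simp only [Option.some.injEq]
        by_cases hkN : 1 ≤ kN
        · have e4 : (((kN + 1 : Nat) : Int) - 2) = ((kN - 1 : Nat) : Int) := by omega
          rw [e4, PySem.List.pyGet?_natCast, List.getElem?_eq_getElem hbound1]
          simp only [Option.some.injEq]
          constructor
          · rintro ⟨h1, h2⟩; exact ⟨h1, fun hx => h2 ⟨by omega, hx.2⟩⟩
          · rintro ⟨h1, h2⟩; exact ⟨h1, fun hx => h2 ⟨hkN, hx.2⟩⟩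
        · constructor
          · rintro ⟨h1, _⟩; exact ⟨h1, fun hx => hkN hx.1⟩
          · rintro ⟨h1, _⟩; exact ⟨h1, fun hx => (by omega : ¬ (((kN + 1 : Nat) : Int) ≥ 2)) hx.1⟩
      have EA_iff : (some (PySem.List.slice cs (some ((kN : Int) + 1 - 1)) (some ((kN : Int) + 1))) = some ['\\'] ∧
            (if ((kN : Int) + 1) > 1 then
                some (PySem.List.slice cs (some ((kN : Int) + 1 - 2)) (some ((kN : Int) + 1)))
              else p2) ≠ some ['\\', '\\'])
          ↔ (cs[kN]'hbound0 = '\\' ∧ ¬(1 ≤ kN ∧ cs[kN - 1]'hbound1 = '\\')) := by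
        rw [hp1]
        by_cases hkN : 1 ≤ kN
        · have hp2' : PySem.List.slice cs (some ((kN : Int) + 1 - 2)) (some ((kN : Int) + 1))
              = [cs[kN - 1]'hbound1, cs[kN]'hbound0] := by
            have e2 : ((kN : Int) + 1 - 2) = ((kN - 1 : Nat) : Int) := by omega
            have e3 : ((kN : Int) + 1) = ((kN - 1 : Nat) : Int) + 2 := by omega
            rw [e2, e3, pv_slice_two cs (kN - 1) (by omega)]
            have e5 : kN - 1 + 1 = kN := by omega
            simp only [e5]
          rw [if_pos (show ((kN : Int) + 1) > 1 by omega), hp2']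
          simp only [Ne, Option.some.injEq, List.cons.injEq, and_true]
          constructor
          · rintro ⟨h1, h2⟩; exact ⟨h1, fun hx => h2 ⟨hx.2, h1⟩⟩
          · rintro ⟨h1, h2⟩; exact ⟨h1, fun hx => h2 ⟨hkN, hx.1⟩⟩
        · rw [if_neg (show ¬(((kN : Int) + 1) > 1) by omega), hp2 (by omega)]
          simp only [Ne, Option.some.injEq, List.cons.injEq, and_true]
          constructor
          · rintro ⟨h1, _⟩; exact ⟨h1, fun hx => hkN hx.1⟩
          · rintro ⟨h1, _⟩; exact ⟨h1, by simp⟩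
      by_cases hesc : (cs[kN]'hbound0 = '\\' ∧ ¬(1 ≤ kN ∧ cs[kN - 1]'hbound1 = '\\'))
      · -- escaped: both loops move on
        have hBneg : ¬¬(PySem.List.pyGet? cs (((kN + 1 : Nat) : Int) - 1) = some '\\' ∧
            ¬(((kN + 1 : Nat) : Int) ≥ 2 ∧ PySem.List.pyGet? cs (((kN + 1 : Nat) : Int) - 2) = some '\\')) :=
          fun hb => hb (EB_iff.mpr hesc)
        rw [if_neg (fun hb => hb.2 (EA_iff.mpr hesc)), if_neg hBneg]
        rw [hcast]
        have hf' : 1 ≤ f' := by rcases hfuel with h | h | h <;> omega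
        have hfuel' : findFrom' cs sub (kN + 1) = -1 ∨ (cs.length : Int) ≤ findFrom' cs sub (kN + 1) ∨
            (cs.length : Int) - findFrom' cs sub (kN + 1) < (f' : Int) := by
          simp only [findFrom']
          rcases eq_or_ne (PySem.Chars.findFrom cs sub (((kN + 1 : Nat) : Int) + 1) none) (-1) with e | e
          · exact Or.inl e
          · right; right
            have hcast3 : (((kN + 1 : Nat) : Int) + 1) = ((kN + 2 : Nat) : Int) := by push_cast; ring
            rw [hcast3] at e ⊢
            have hsp := (PySem.Chars.findFrom_natCast_spec cs sub (kN + 2) (by omega) e).1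
            rcases hfuel with h | h | h <;> omega
        have hrec := ih (kN + 1) (some (PySem.List.slice cs (some ((kN + 1 : Nat) : Int)) (some (((kN + 1 : Nat) : Int) + 1))))
            (if (((kN + 1 : Nat) : Int)) > 1 then some (PySem.List.slice cs (some (((kN + 1 : Nat) : Int) - 2)) (some ((kN + 1 : Nat) : Int))) else p2)
            (by omega) (fun h => absurd h (by omega)) f' hf' hfuel'
        simp only [findFrom'] at hrec
        exact hrec
      · -- unescaped candidate: both return it
        have hBpos : ¬(PySem.List.pyGet? cs (((kN + 1 : Nat) : Int) - 1) = some '\\' ∧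
            ¬(((kN + 1 : Nat) : Int) ≥ 2 ∧ PySem.List.pyGet? cs (((kN + 1 : Nat) : Int) - 2) = some '\\')) :=
          fun hEB => hesc (EB_iff.mp hEB)
        rw [if_pos (⟨hslice.mpr hocc, fun hEA => hesc (EA_iff.mp hEA)⟩ : _ ∧ _), if_pos hBpos]
        rw [hcast]
    · -- no candidate at kN+1: A moves on, B's find is unchanged
      rw [if_neg (fun hb => hocc (hslice.mp hb.1))]
      have hstep : PySem.Chars.findFrom cs sub ((kN : Int) + 1) none
          = PySem.Chars.findFrom cs sub ((kN : Int) + 1 + 1) none := by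
        rw [hcast]; exact pv_ffStep cs sub (kN + 1) hT hocc
      rw [hstep] at hfuel ⊢
      have hcast2 : ((kN : Int) + 1 + 1) = (((kN + 1 : Nat) : Int) + 1) := by push_cast; ring
      rw [hcast2] at hfuel ⊢
      rw [hcast]
      have hrec := ih (kN + 1) (some (PySem.List.slice cs (some ((kN + 1 : Nat) : Int)) (some (((kN + 1 : Nat) : Int) + 1))))
            (if (((kN + 1 : Nat) : Int)) > 1 then some (PySem.List.slice cs (some (((kN + 1 : Nat) : Int) - 2)) (some ((kN + 1 : Nat) : Int))) else p2)
            (by omega) (fun h => absurd h (by omega)) f hf (by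
        simp only [findFrom']; exact hfuel)
      simp only [findFrom'] at hrec
      exact hrec

-- ===== VERDICT (by name: the statement is the Claim_ definition above) =====
theorem find_delims_spec : Claim_equal_find_delims := by
  unfold Claim_equal_find_delims
  intro s delim match_ _
  unfold Spec_find_delims
  simp only [find_delims, find_delims_alt]
  set dl := delim.toList with hdl
  set mt := (match_.getD delim).toList with hmt
  have hjlb := PySem.Chars.neg_one_le_find s.toList dl
  by_cases hj1 : PySem.Chars.find s.toList dl = -1
  · rw [hj1, if_neg (fun hb => absurd hb.1 (by omega)), if_pos rfl]
  · have hj0 : (0 : Int) ≤ PySem.Chars.find s.toList dl := by omega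
    set jN := (PySem.Chars.find s.toList dl).toNat with hjN
    have hjcast : PySem.Chars.find s.toList dl = (jN : Int) := by
      rw [hjN]; exact (Int.toNat_of_nonneg hj0).symm
    have hpre : dl <+: s.toList.drop jN := by
      rw [hjN]; exact (PySem.Chars.find_spec hj0).1
    have hjlen : jN ≤ s.toList.length := by
      have := PySem.Chars.find_le_length s.toList dl; omega
    rw [hjcast]
    rw [if_pos (⟨by omega, (pv_slice_eq_iff s.toList dl jN).mpr hpre⟩ :
          ((jN : Int) > -1) ∧ _),
        if_neg (show ¬((jN : Int) = -1) by omega)]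
    by_cases hn : s.toList.length = 0
    · have hnil : s.toList = [] := List.length_eq_zero_iff.mp hn
      rw [hnil]
      rw [pv_ff_nil mt ((jN : Int) + 1) (by omega)]
      rw [PySem.List.slice_from ([] : List Char) (show (0 : Int) ≤ (jN : Int) + 1 by omega)]
      simp [findDelimsScan, findDelimsJump]
    · have hjn : jN < s.toList.length := by
        by_contra hge
        have he : jN = s.toList.length := by omega
        have hdln : dl = [] := by
          have hp := hpre; rw [he, List.drop_length] at hp
          exact List.prefix_nil.mp hp
        have hf0 : PySem.Chars.find s.toList dl = 0 := by
          rw [hdln]; exact PySem.Chars.find_nil _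
        rw [hf0] at hjN
        omega
      have hbd : (((jN : Int) + ((PySem.List.slice s.toList (some ((jN : Int) + 1)) none).length : Int) - (jN : Int))).toNat
          = s.toList.length - jN - 1 := by
        rw [PySem.List.slice_from s.toList (show (0 : Int) ≤ (jN : Int) + 1 by omega)]
        have h1 : ((jN : Int) + 1).toNat = jN + 1 := by omega
        rw [h1, List.length_drop]
        omega
      rw [hbd]
      have hfuel : findFrom' s.toList mt jN = -1 ∨ (s.toList.length : Int) ≤ findFrom' s.toList mt jN ∨
          (s.toList.length : Int) - findFrom' s.toList mt jN < ((s.toList.length + 1 : Nat) : Int) := by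
        simp only [findFrom']
        rcases eq_or_ne (PySem.Chars.findFrom s.toList mt ((jN : Int) + 1) none) (-1) with e | e
        · exact Or.inl e
        · right; right
          have hc : ((jN : Int) + 1) = ((jN + 1 : Nat) : Int) := by push_cast; ring
          rw [hc] at e ⊢
          have := (PySem.Chars.findFrom_natCast_spec s.toList mt (jN + 1) (by omega) e).1
          omega
      have hmain := pv_main s.toList mt (s.toList.length - jN - 1) jN none none
        (by omega) (fun _ => rfl) (s.toList.length + 1) (by omega) hfuel
      simp only [findFrom'] at hmain
      rw [hmain]
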